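-- pv_equiv track=rewrite | github.com/asvilen/SoftUni | 02_python_fundamentals/text_processing/exercises/10_winning_ticket.py | ticket_checker
-- ===== SOURCE A (Python) =====
-- def ticket_checker(text):
--     if len(text) != 20:
--         return "invalid ticket"
--     half_length = int(len(text) / 2)
--     left_part = text[:half_length]
--     right_part = text[half_length:]
--     winning_symbols = ['@', '#', '$', '^']
--     for winning_symbol in winning_symbols:
--         if winning_symbol in text:
--             for repetitions in range(10, 5, -1):
--                 winning_symbol_repetitions = winning_symbol * repetitions
--                 if winning_symbol_repetitions in left_part and winning_symbol_repetitions in right_part: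
--                     if repetitions == 10:
--                         return f'ticket "{text}" - {repetitions}{winning_symbol} Jackpot!'
--                     else:
--                         return f'ticket "{text}" - {repetitions}{winning_symbol}'
--     return f'ticket "{text}" - no match'
-- ===== SOURCE B (Python) =====
-- def ticket_checker(text):
--     if len(text) != 20:
--         return "invalid ticket"
--     left, right = text[:10], text[10:]
--
--     def max_run(half, sym):
--         best = cur = 0
--         for ch in half:
--             cur = cur + 1 if ch == sym else 0
--             if cur > best:
--                 best = cur
--         return best
--
--     for sym in ['@', '#', '$', '^']:
--         m = min(max_run(left, sym), max_run(right, sym))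
--         if m >= 6:
--             if m == 10:
--                 return f'ticket "{text}" - {m}{sym} Jackpot!'
--             return f'ticket "{text}" - {m}{sym}'
--     return f'ticket "{text}" - no match'
-- ===== Notes on version B (the rewrite author's own statement) =====
-- stated objective: alternative
-- what changed: Replaces the descending substring-membership tests (symbol*rep in each half for rep 10..6) with a single run-length scan per half per symbol, taking m = min of the two longest runs and returning at m >= 6 (Jackpot at m == 10).
import Mathlib
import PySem

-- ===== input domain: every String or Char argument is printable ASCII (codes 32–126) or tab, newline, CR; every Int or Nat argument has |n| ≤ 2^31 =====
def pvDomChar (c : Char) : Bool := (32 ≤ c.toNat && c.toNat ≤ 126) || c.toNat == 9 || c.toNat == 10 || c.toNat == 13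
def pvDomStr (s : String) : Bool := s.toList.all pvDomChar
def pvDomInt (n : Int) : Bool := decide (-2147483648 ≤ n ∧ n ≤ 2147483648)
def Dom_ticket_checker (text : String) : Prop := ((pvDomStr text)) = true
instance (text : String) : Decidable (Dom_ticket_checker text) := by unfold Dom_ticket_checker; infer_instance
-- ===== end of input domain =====

-- B replaces A's descending substring-membership tests (symbol*rep in each half)
-- with one run-length scan per half per symbol; same results, alternative algorithm.

-- ===== PORT A =====
-- inner 'for repetitions in range(10, 5, -1)' loop with early return
def ticket_checker_goRep (text : String) (left right : List Char) (sym : Char) :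
    List Int → Option String
  | [] => none
  | rep :: rest =>
    let w := PySem.List.pyRepeat [sym] rep
    if PySem.Chars.isIn w left = true ∧ PySem.Chars.isIn w right = true then
      if rep = 10 then
        some ("ticket \"" ++ text ++ "\" - " ++ PySem.Int.toStr rep ++ String.mk [sym] ++ " Jackpot!")
      else
        some ("ticket \"" ++ text ++ "\" - " ++ PySem.Int.toStr rep ++ String.mk [sym])
    else ticket_checker_goRep text left right sym rest

-- outer 'for winning_symbol in winning_symbols' loop with early return
def ticket_checker_goSym (text : String) (tl left right : List Char) :
    List Char → Option String
  | [] => none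
  | sym :: rest =>
    if PySem.Chars.isIn [sym] tl = true then
      match ticket_checker_goRep text left right sym (PySem.List.pyRange 10 5 (-1)) with
      | some r => some r
      | none => ticket_checker_goSym text tl left right rest
    else ticket_checker_goSym text tl left right rest

def ticket_checker (text : String) : String :=
  if PySem.Str.len text ≠ 20 then "invalid ticket"
  else
    let halfLength := PySem.Int.truncdiv (PySem.Str.len text) 2
    let leftPart := PySem.List.slice text.toList none (some halfLength)
    let rightPart := PySem.List.slice text.toList (some halfLength) none
    match ticket_checker_goSym text text.toList leftPart rightPart ['@', '#', '$', '^'] with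
    | some r => r
    | none => "ticket \"" ++ text ++ "\" - no match"

-- ===== PORT B =====
-- longest run of consecutive `sym` in `half` (the cur/best loop of Source B)
def ticket_checker_alt_maxRun (half : List Char) (sym : Char) : Int :=
  (half.foldl
    (fun (s : Int × Int) ch =>
      let cur : Int := if ch = sym then s.1 + 1 else 0
      (cur, if s.2 < cur then cur else s.2))
    (0, 0)).2

def ticket_checker_alt_go (text : String) (left right : List Char) : List Char → String
  | [] => "ticket \"" ++ text ++ "\" - no match"
  | sym :: rest =>
    let m := min (ticket_checker_alt_maxRun left sym) (ticket_checker_alt_maxRun right sym)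
    if 6 ≤ m then
      if m = 10 then
        "ticket \"" ++ text ++ "\" - " ++ PySem.Int.toStr m ++ String.mk [sym] ++ " Jackpot!"
      else
        "ticket \"" ++ text ++ "\" - " ++ PySem.Int.toStr m ++ String.mk [sym]
    else ticket_checker_alt_go text left right rest

def ticket_checker_alt (text : String) : String :=
  if PySem.Str.len text ≠ 20 then "invalid ticket"
  else
    let left := PySem.List.slice text.toList none (some 10)
    let right := PySem.List.slice text.toList (some 10) none
    ticket_checker_alt_go text left right ['@', '#', '$', '^']

-- ===== PRECONDITION & SPEC =====
def Spec_ticket_checker (text : String) (out : String) : Prop := out = ticket_checker_alt text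
instance (text : String) (out : String) : Decidable (Spec_ticket_checker text out) := by unfold Spec_ticket_checker; infer_instance

-- ===== CLAIM (what is proved, stated in full; the proofs are below) =====
def Claim_equal_ticket_checker : Prop := ∀ (text : String), Dom_ticket_checker text → Spec_ticket_checker text (ticket_checker text)

-- ===== LEMMAS AND PROOFS =====

-- length of the initial run of `c`
def pvHeadRun (c : Char) : List Char → Nat
  | [] => 0
  | x :: xs => if x = c then pvHeadRun c xs + 1 else 0

-- length of the longest run of `c`
def pvBestRun (c : Char) : List Char → Nat
  | [] => 0
  | x :: xs => if x = c then max (pvHeadRun c xs + 1) (pvBestRun c xs) else pvBestRun c xs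

theorem pvHeadRun_le_bestRun (c : Char) (l : List Char) : pvHeadRun c l ≤ pvBestRun c l := by
  cases l with
  | nil => simp [pvHeadRun, pvBestRun]
  | cons x xs =>
    simp only [pvHeadRun, pvBestRun]
    split_ifs <;> omega

theorem pvHeadRun_le_length (c : Char) (l : List Char) : pvHeadRun c l ≤ l.length := by
  induction l with
  | nil => simp [pvHeadRun]
  | cons x xs ih => simp only [pvHeadRun, List.length_cons]; split_ifs <;> omega

theorem pvBestRun_le_length (c : Char) (l : List Char) : pvBestRun c l ≤ l.length := by
  induction l with
  | nil => simp [pvBestRun]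
  | cons x xs ih =>
    have := pvHeadRun_le_length c xs
    simp only [pvBestRun, List.length_cons]; split_ifs <;> omega

theorem pvReplicate_prefix_iff (c : Char) (k : Nat) (l : List Char) :
    List.replicate k c <+: l ↔ k ≤ pvHeadRun c l := by
  induction l generalizing k with
  | nil =>
    cases k with
    | zero => simp [pvHeadRun]
    | succ n => simp [List.replicate_succ, pvHeadRun]
  | cons x xs ih =>
    cases k with
    | zero => simp [List.replicate]
    | succ n =>
      by_cases hx : x = c
      · subst hx
        simp only [List.replicate_succ, List.cons_prefix_cons, ih n, pvHeadRun,
          if_true, true_and]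
        omega
      · rw [List.replicate_succ, List.cons_prefix_cons]
        simp only [pvHeadRun, if_neg hx]
        simp [Ne.symm hx]

theorem pvReplicate_infix_iff (c : Char) (k : Nat) (l : List Char) :
    List.replicate k c <:+: l ↔ k ≤ pvBestRun c l := by
  induction l generalizing k with
  | nil =>
    cases k with
    | zero => simp [pvBestRun]
    | succ n => simp [List.replicate_succ, pvBestRun]
  | cons x xs ih =>
    rw [List.infix_cons_iff, pvReplicate_prefix_iff, ih]
    have h1 := pvHeadRun_le_bestRun c xs
    simp only [pvHeadRun, pvBestRun]
    split_ifs <;> omega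

-- B's loop body, named so the fold lemma can be stated about it (defeq to the lambda in the port)
def pvStep (c : Char) (s : Int × Int) (ch : Char) : Int × Int :=
  let cur : Int := if ch = c then s.1 + 1 else 0
  (cur, if s.2 < cur then cur else s.2)

theorem pvFold_spec (c : Char) (l : List Char) :
    ∀ (cur best : Int), 0 ≤ cur → cur ≤ best →
      (l.foldl (pvStep c) (cur, best)).2
      = max best (max (cur + (pvHeadRun c l : Int)) (pvBestRun c l : Int)) := by
  induction l with
  | nil =>
    intro cur best h0 hcb
    simp only [List.foldl_nil, pvHeadRun, pvBestRun, Nat.cast_zero]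
    omega
  | cons x xs ih =>
    intro cur best h0 hcb
    rw [List.foldl_cons]
    have h1 := pvHeadRun_le_bestRun c xs
    by_cases hx : x = c
    · rw [show pvStep c (cur, best) x = (cur + 1, if best < cur + 1 then cur + 1 else best) from
        by simp [pvStep, hx]]
      rw [ih (cur + 1) _ (by omega) (by split_ifs <;> omega)]
      simp only [pvHeadRun, pvBestRun, if_pos hx]
      push_cast
      split_ifs <;> omega
    · rw [show pvStep c (cur, best) x = (0, if best < 0 then 0 else best) from
        by simp [pvStep, hx]]
      rw [ih 0 _ le_rfl (by split_ifs <;> omega)]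
      simp only [pvHeadRun, pvBestRun, if_neg hx]
      push_cast
      split_ifs <;> omega

theorem pvMaxRun_eq (half : List Char) (sym : Char) :
    ticket_checker_alt_maxRun half sym = (pvBestRun sym half : Int) := by
  have h := pvHeadRun_le_bestRun sym half
  show (half.foldl (pvStep sym) (0, 0)).2 = _
  rw [pvFold_spec sym half 0 0 le_rfl le_rfl]
  omega

theorem pvGoRep_eq (text : String) (sym : Char) (left right : List Char)
    (hl : left.length ≤ 10) (hr : right.length ≤ 10) :
    ticket_checker_goRep text left right sym [10, 9, 8, 7, 6] =
      (if 6 ≤ min (pvBestRun sym left) (pvBestRun sym right) then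
        some (if min (pvBestRun sym left) (pvBestRun sym right) = 10 then
          "ticket \"" ++ text ++ "\" - " ++ PySem.Int.toStr (min (pvBestRun sym left) (pvBestRun sym right) : Nat) ++ String.mk [sym] ++ " Jackpot!"
        else
          "ticket \"" ++ text ++ "\" - " ++ PySem.Int.toStr (min (pvBestRun sym left) (pvBestRun sym right) : Nat) ++ String.mk [sym])
      else none) := by
  have ha := pvBestRun_le_length sym left
  have hb := pvBestRun_le_length sym right
  set m := min (pvBestRun sym left) (pvBestRun sym right) with hmdef
  have key : ∀ k : Int, 0 ≤ k →
      ((PySem.Chars.isIn (PySem.List.pyRepeat [sym] k) left = true ∧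
        PySem.Chars.isIn (PySem.List.pyRepeat [sym] k) right = true) ↔ k.toNat ≤ m) := by
    intro k hk
    rw [PySem.List.pyRepeat_singleton,
      PySem.Chars.isIn_iff_infix, PySem.Chars.isIn_iff_infix,
      pvReplicate_infix_iff, pvReplicate_infix_iff, hmdef, ← le_min_iff]
  have e10 := key 10 (by norm_num); have e9 := key 9 (by norm_num)
  have e8 := key 8 (by norm_num); have e7 := key 7 (by norm_num)
  have e6 := key 6 (by norm_num)
  rw [show ((10 : Int)).toNat = 10 from rfl] at e10
  rw [show ((9 : Int)).toNat = 9 from rfl] at e9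
  rw [show ((8 : Int)).toNat = 8 from rfl] at e8
  rw [show ((7 : Int)).toNat = 7 from rfl] at e7
  rw [show ((6 : Int)).toNat = 6 from rfl] at e6
  have hm : m ≤ 10 := by omega
  simp only [ticket_checker_goRep, e10, e9, e8, e7, e6]
  interval_cases m <;> norm_num

theorem pvGoSym_eq (text : String) (tl left right : List Char)
    (hleft : left <:+: tl) (hl : left.length ≤ 10) (hr : right.length ≤ 10) :
    ∀ syms : List Char,
      (match ticket_checker_goSym text tl left right syms with
        | some r => r
        | none => "ticket \"" ++ text ++ "\" - no match") =
      ticket_checker_alt_go text left right syms := by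
  intro syms
  induction syms with
  | nil => rfl
  | cons sym rest ih =>
    have hrange : PySem.List.pyRange 10 5 (-1) = [10, 9, 8, 7, 6] := by decide
    have hrw := pvGoRep_eq text sym left right hl hr
    set m := min (pvBestRun sym left) (pvBestRun sym right) with hmdef
    simp only [ticket_checker_goSym, ticket_checker_alt_go, hrange, hrw,
      pvMaxRun_eq, ← Nat.cast_min, ← hmdef]
    by_cases hm : 6 ≤ m
    · have hin : PySem.Chars.isIn [sym] tl = true := by
        rw [PySem.Chars.isIn_iff_infix]
        have h1 : List.replicate 1 sym <:+: left :=
          (pvReplicate_infix_iff sym 1 left).2 (by omega)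
        simpa using h1.trans hleft
      have hm' : (6 : Int) ≤ (m : Int) := by exact_mod_cast hm
      rw [if_pos hin, if_pos hm, if_pos hm']
      by_cases h10 : m = 10
      · rw [if_pos h10, if_pos (by exact_mod_cast h10 : (m : Int) = 10)]
      · rw [if_neg h10, if_neg (by exact_mod_cast h10 : ¬ (m : Int) = 10)]
    · have hm' : ¬ (6 : Int) ≤ (m : Int) := by exact_mod_cast hm
      rw [if_neg hm']
      by_cases hin : PySem.Chars.isIn [sym] tl = true
      · rw [if_pos hin, if_neg hm]
        exact ih
      · rw [if_neg hin]
        exact ih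

theorem ticket_checker_spec : Claim_equal_ticket_checker := by
  intro text _
  unfold Spec_ticket_checker ticket_checker ticket_checker_alt
  by_cases h20 : PySem.Str.len text = 20
  · have hlen : text.toList.length = 20 := by
      have := PySem.Str.len_eq text
      omega
    rw [if_neg (not_not_intro h20), if_neg (not_not_intro h20), h20]
    have htr : PySem.Int.truncdiv 20 2 = 10 := by decide
    have hslice1 : PySem.List.slice text.toList none (some 10) = List.take 10 text.toList := by
      rw [PySem.List.slice_to _ (by norm_num)]; rfl
    have hslice2 : PySem.List.slice text.toList (some 10) = List.drop 10 text.toList := by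
      rw [PySem.List.slice_from _ (by norm_num)]; rfl
    simp only [htr, hslice1, hslice2]
    refine pvGoSym_eq text text.toList (List.take 10 text.toList) (List.drop 10 text.toList)
      (List.take_prefix 10 text.toList).isInfix ?_ ?_ ['@', '#', '$', '^']
    · rw [List.length_take, hlen]; omega
    · rw [List.length_drop, hlen]
  · rw [if_pos h20, if_pos h20]
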